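-- pv_equiv track=rewrite | github.com/JosefJoubert/AI | Prac7/q12.py | most_type
-- ===== SOURCE A (Python) =====
-- def most_type (neighbours):
--
--     count1 = 0
--     count2 = 0
--     count3 = 0
--
--
--     for i in neighbours:
--
--         if i[1] ==  "Iris Setosa":
--
--             count1 += 1
--
--         if i[1] == "Iris Versicolour" :
--
--             count2 += 1
--
--         if i[1] == "Iris Virginica" :
--
--              count3 += 1
--
--     if count1 > count2 and count1 > count3 :
--
--         return "Iris Setosa"
--
--     if count2 > count1 and count2 > count3 :
--
--         return "Iris Versicolour"
--
--     if count3 > count2 and count3 > count1 :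
--
--         return "Iris Virginica"
--
--     else :
--
--         "ERROR ?!"
-- ===== SOURCE B (Python) =====
-- def most_type(neighbours):
--     labels = {"Iris Setosa", "Iris Versicolour", "Iris Virginica"}
--     ks = sorted(k for _, k in neighbours if k in labels)
--     runs = []
--     for k in ks:
--         if runs and runs[-1][0] == k:
--             runs[-1] = (k, runs[-1][1] + 1)
--         else:
--             runs.append((k, 1))
--     best = None
--     tie = False
--     for k, r in runs:
--         if best is None or r > best[1]:
--             best = (k, r)
--             tie = False
--         elif r == best[1]:
--             tie = True
--     return best[0] if best is not None and not tie else None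
-- ===== Notes on version B (the rewrite author's own statement) =====
-- stated objective: alternative
-- what changed: B replaces A's single counting pass plus comparison chain by a sort-then-scan algorithm: it sorts the relevant iris labels, groups adjacent equal labels into runs, and returns the label of the unique longest run (None if the longest run is not unique or there are no relevant labels).
import Mathlib
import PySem

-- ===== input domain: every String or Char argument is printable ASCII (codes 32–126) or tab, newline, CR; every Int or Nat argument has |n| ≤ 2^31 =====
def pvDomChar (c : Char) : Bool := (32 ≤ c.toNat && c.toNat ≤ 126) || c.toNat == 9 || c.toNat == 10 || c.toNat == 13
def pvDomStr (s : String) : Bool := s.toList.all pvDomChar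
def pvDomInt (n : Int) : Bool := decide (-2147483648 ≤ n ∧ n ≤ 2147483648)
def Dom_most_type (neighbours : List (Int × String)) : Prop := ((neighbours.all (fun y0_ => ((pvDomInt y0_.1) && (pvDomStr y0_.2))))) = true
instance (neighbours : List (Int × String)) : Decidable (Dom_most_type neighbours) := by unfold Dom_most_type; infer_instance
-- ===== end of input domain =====

-- B replaces A's counting pass + comparison chain by sort-then-scan: sort the relevant
-- labels, group adjacent equal ones into runs, return the label of the unique longest run.


-- ===== PORT A =====
def most_type (neighbours : List (Int × String)) : Option String :=
  let c := neighbours.foldl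
    (fun (c : Int × Int × Int) i =>
      let c := if i.2 == "Iris Setosa" then (c.1 + 1, c.2.1, c.2.2) else c
      let c := if i.2 == "Iris Versicolour" then (c.1, c.2.1 + 1, c.2.2) else c
      if i.2 == "Iris Virginica" then (c.1, c.2.1, c.2.2 + 1) else c)
    (0, 0, 0)
  if c.1 > c.2.1 && c.1 > c.2.2 then some "Iris Setosa"
  else if c.2.1 > c.1 && c.2.1 > c.2.2 then some "Iris Versicolour"
  else if c.2.2 > c.2.1 && c.2.2 > c.1 then some "Iris Virginica"
  else none

-- ===== PORT B =====
-- 'for k in ks: extend the current last run or start a new one' (the runs[-1] update)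
def mtRunStep (runs : List (String × Int)) (k : String) : List (String × Int) :=
  match runs.getLast? with
  | some p => if p.1 == k then runs.dropLast ++ [(k, p.2 + 1)] else runs ++ [(k, 1)]
  | none => runs ++ [(k, 1)]

-- 'for k, r in runs: track the best run and the tie flag'
def mtBestStep (st : Option (String × Int) × Bool) (p : String × Int) :
    Option (String × Int) × Bool :=
  match st.1 with
  | none => (some p, false)
  | some b => if p.2 > b.2 then (some p, false)
              else if p.2 == b.2 then (st.1, true)
              else st

def most_type_alt (neighbours : List (Int × String)) : Option String :=
  let labels : List String := ["Iris Setosa", "Iris Versicolour", "Iris Virginica"]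
  let ks := PySem.List.sorted
    ((neighbours.map (fun p => p.2)).filter (fun k => labels.contains k)) (fun x => x) false
  let runs := ks.foldl mtRunStep []
  let st := runs.foldl mtBestStep (none, false)
  match st.1 with
  | some b => if st.2 then none else some b.1
  | none => none

-- ===== PRECONDITION & SPEC =====
def Spec_most_type (neighbours : List (Int × String)) (out : Option String) : Prop := out = most_type_alt neighbours
instance (neighbours : List (Int × String)) (out : Option String) : Decidable (Spec_most_type neighbours out) := by unfold Spec_most_type; infer_instance

-- ===== CLAIM (what is proved, stated in full; the proofs are below) =====
def Claim_equal_most_type : Prop := ∀ (neighbours : List (Int × String)), Dom_most_type neighbours → Spec_most_type neighbours (most_type neighbours)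

-- ===== LEMMAS AND PROOFS =====

-- B's grouping loop over one block of equal labels extends the current last run
theorem mt_runs_ext (x : String) (rs : List (String × Int)) (m : Int) (n : Nat) :
    (List.replicate n x).foldl mtRunStep (rs ++ [(x, m)]) = rs ++ [(x, m + n)] := by
  induction n generalizing m with
  | zero => simp
  | succ n ih =>
      rw [List.replicate_succ, List.foldl_cons]
      have : mtRunStep (rs ++ [(x, m)]) x = rs ++ [(x, m + 1)] := by
        simp [mtRunStep]
      rw [this, ih]
      have : m + 1 + (n : Int) = m + ((n : Nat) + 1 : Nat) := by push_cast; ring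
      rw [this]

-- a block whose label differs from the last run's label starts a fresh run
theorem mt_runs_new (x : String) (rs : List (String × Int))
    (h : ∀ p ∈ rs.getLast?, p.1 ≠ x) (n : Nat) (hn : 0 < n) :
    (List.replicate n x).foldl mtRunStep rs = rs ++ [(x, (n : Int))] := by
  obtain ⟨m, rfl⟩ : ∃ m, n = m + 1 := ⟨n - 1, by omega⟩
  rw [List.replicate_succ, List.foldl_cons]
  have h1 : mtRunStep rs x = rs ++ [(x, 1)] := by
    unfold mtRunStep
    cases hrs : rs.getLast? with
    | none => rfl
    | some p =>
        have := h p (by simp [hrs])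
        simp [this]
  rw [h1, mt_runs_ext]
  have : (1 : Int) + m = ((m + 1 : Nat) : Int) := by push_cast; ring
  rw [this]

-- the filtered label list is a permutation of the three replicate blocks
theorem mt_filter_perm (ks : List String) :
    (ks.filter (fun k =>
      (["Iris Setosa", "Iris Versicolour", "Iris Virginica"] : List String).contains k)).Perm
    (List.replicate (ks.count "Iris Setosa") "Iris Setosa" ++
     (List.replicate (ks.count "Iris Versicolour") "Iris Versicolour" ++
      List.replicate (ks.count "Iris Virginica") "Iris Virginica")) := by
  induction ks with
  | nil => simp
  | cons x xs ih =>
      by_cases h1 : x = "Iris Setosa"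
      · subst h1
        rw [List.filter_cons_of_pos (by decide), List.count_cons_self,
            List.count_cons_of_ne (by decide), List.count_cons_of_ne (by decide),
            List.replicate_succ]
        exact ih.cons _
      · by_cases h2 : x = "Iris Versicolour"
        · subst h2
          rw [List.filter_cons_of_pos (by decide), List.count_cons_self,
              List.count_cons_of_ne (by decide), List.count_cons_of_ne (by decide),
              List.replicate_succ]
          exact (ih.cons _).trans List.perm_middle.symm
        · by_cases h3 : x = "Iris Virginica"
          · subst h3
            rw [List.filter_cons_of_pos (by decide), List.count_cons_self,
                List.count_cons_of_ne (by decide), List.count_cons_of_ne (by decide),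
                List.replicate_succ, ← List.append_assoc]
            refine (ih.cons _).trans ?_
            rw [← List.append_assoc]
            exact List.perm_middle.symm
          · rw [List.filter_cons_of_neg (by simp [h1, h2, h3]),
                List.count_cons_of_ne h1, List.count_cons_of_ne h2,
                List.count_cons_of_ne h3]
            exact ih

-- one replicate block through the grouping loop, both cases at once
theorem mt_block (x : String) (rs : List (String × Int)) (n : Nat)
    (h : ∀ p ∈ rs.getLast?, p.1 ≠ x) :
    (List.replicate n x).foldl mtRunStep rs =
      rs ++ (if n = 0 then [] else [(x, (n : Int))]) := by
  rcases Nat.eq_zero_or_pos n with h0 | h0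
  · simp [h0]
  · rw [mt_runs_new x rs h n h0, if_neg (by omega)]

-- the grouping pass turns the three sorted blocks into at most three runs
theorem mt_runs_eq (c1 c2 c3 : Nat) :
    ((List.replicate c1 "Iris Setosa" ++
      (List.replicate c2 "Iris Versicolour" ++
       List.replicate c3 "Iris Virginica")).foldl mtRunStep []) =
    ((if c1 = 0 then [] else [("Iris Setosa", (c1 : Int))]) ++
     ((if c2 = 0 then [] else [("Iris Versicolour", (c2 : Int))]) ++
      (if c3 = 0 then [] else [("Iris Virginica", (c3 : Int))]))) := by
  rw [List.foldl_append, List.foldl_append]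
  rw [mt_block "Iris Setosa" [] c1 (by simp), List.nil_append]
  rw [mt_block "Iris Versicolour" _ c2 (by split <;> simp)]
  rw [mt_block "Iris Virginica" _ c3 (by split <;> split <;> simp)]
  rw [List.append_assoc]

-- sorting the filtered labels yields the three blocks in lexicographic label order
theorem mt_sorted_eq (ks : List String) :
    PySem.List.sorted (ks.filter (fun k =>
      (["Iris Setosa", "Iris Versicolour", "Iris Virginica"] : List String).contains k))
      (fun x => x) false =
    (List.replicate (ks.count "Iris Setosa") "Iris Setosa" ++
     (List.replicate (ks.count "Iris Versicolour") "Iris Versicolour" ++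
      List.replicate (ks.count "Iris Virginica") "Iris Virginica")) := by
  refine PySem.List.sorted_id_eq_of_perm_of_pairwise _ _ (mt_filter_perm ks).symm ?_
  rw [List.pairwise_append]
  refine ⟨List.pairwise_replicate.mpr (by simp), ?_, ?_⟩
  · rw [List.pairwise_append]
    refine ⟨List.pairwise_replicate.mpr (by simp), List.pairwise_replicate.mpr (by simp), ?_⟩
    intro a ha b hb
    rw [List.eq_of_mem_replicate ha, List.eq_of_mem_replicate hb,
        String.le_iff_toList_le]
    decide
  · intro a ha b hb
    rw [List.eq_of_mem_replicate ha]
    rcases List.mem_append.mp hb with h | h <;>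
      rw [List.eq_of_mem_replicate h, String.le_iff_toList_le] <;> decide

-- A's loop produces exactly the three label counts
theorem most_type_foldl_eq (neighbours : List (Int × String)) (a b c : Int) :
    neighbours.foldl
      (fun (c : Int × Int × Int) i =>
        let c := if i.2 == "Iris Setosa" then (c.1 + 1, c.2.1, c.2.2) else c
        let c := if i.2 == "Iris Versicolour" then (c.1, c.2.1 + 1, c.2.2) else c
        if i.2 == "Iris Virginica" then (c.1, c.2.1, c.2.2 + 1) else c)
      (a, b, c)
    = (a + ((neighbours.map (fun p => p.2)).count "Iris Setosa" : Int),
       b + ((neighbours.map (fun p => p.2)).count "Iris Versicolour" : Int),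
       c + ((neighbours.map (fun p => p.2)).count "Iris Virginica" : Int)) := by
  induction neighbours generalizing a b c with
  | nil => simp
  | cons x xs ih =>
      simp only [List.foldl_cons, List.map_cons]
      by_cases h1 : x.2 = "Iris Setosa" <;>
      by_cases h2 : x.2 = "Iris Versicolour" <;>
      by_cases h3 : x.2 = "Iris Virginica" <;>
        simp_all <;> omega

-- both ports reduced to the three counts; finite case bash on which counts are zero
theorem most_type_eq_alt (neighbours : List (Int × String)) :
    most_type neighbours = most_type_alt neighbours := by
  unfold most_type most_type_alt
  simp only [most_type_foldl_eq, zero_add, mt_sorted_eq, mt_runs_eq]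
  generalize ((neighbours.map (fun p => p.2)).count "Iris Setosa") = c1
  generalize ((neighbours.map (fun p => p.2)).count "Iris Versicolour") = c2
  generalize ((neighbours.map (fun p => p.2)).count "Iris Virginica") = c3
  by_cases e1 : c1 = 0 <;> by_cases e2 : c2 = 0 <;> by_cases e3 : c3 = 0 <;>
    simp [mtBestStep, e1, e2, e3] <;>
    split_ifs <;> try (first | rfl | omega | simp_all) <;>
    split_ifs at * <;> simp_all <;> omega

-- ===== VERDICT (by name: the statement is the Claim_ definition above) =====
theorem most_type_spec : Claim_equal_most_type := by
  intro neighbours _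
  exact most_type_eq_alt neighbours
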